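-- pv_equiv track=rewrite | github.com/Nayu-bae/advent-of-code | day8/solve8part2.py | notCommon
-- ===== SOURCE A (Python) =====
-- def notCommon(arr):
--     not_common = []
--     for num in arr:
--         for letter in num:
--             count = 0
--             for num2 in arr:
--                 if letter in num2:
--                     count += 1
--             if count == 2 and not letter in not_common:
--                 not_common.append(letter)
--     return not_common
-- ===== SOURCE B (Python) =====
-- def notCommon(arr):
--     # One forward pass: count per-string occurrences of each distinct letter,
--     # then filter the first-seen-ordered distinct letters once.
--     counts = {}
--     for s in arr:
--         for letter in set(s):
--             counts[letter] = counts.get(letter, 0) + 1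
--     order = dict.fromkeys("".join(arr))
--     return [letter for letter in order if counts[letter] == 2]
-- ===== Notes on version B (the rewrite author's own statement) =====
-- stated objective: faster
-- what changed: Replaces A's per-letter rescan of the whole array (and dedup-by-list output loop) with one forward pass building a counts dict keyed by distinct letters per string plus an insertion-ordered dict of first occurrences, then a single filter pass over the distinct letters.
import Mathlib
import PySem

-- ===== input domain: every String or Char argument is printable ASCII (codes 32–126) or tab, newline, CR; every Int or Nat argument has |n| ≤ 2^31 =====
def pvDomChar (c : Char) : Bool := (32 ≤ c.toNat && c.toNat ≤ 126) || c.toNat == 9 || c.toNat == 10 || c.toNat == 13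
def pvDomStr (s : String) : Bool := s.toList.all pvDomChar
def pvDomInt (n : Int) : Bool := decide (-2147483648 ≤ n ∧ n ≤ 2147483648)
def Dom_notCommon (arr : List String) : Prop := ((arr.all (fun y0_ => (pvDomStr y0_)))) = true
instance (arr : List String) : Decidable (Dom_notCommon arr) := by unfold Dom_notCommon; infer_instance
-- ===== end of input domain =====

-- B replaces A's per-letter full rescans by one counting pass plus one dedup/filter pass (faster).

-- ===== PORT A =====
-- letters (1-char Python strings) are iterated as Chars; 'letter in num2' on a
-- 1-char letter is exactly Char membership; the appended letter is String.ofList [c]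
def notCommon (arr : List String) : List String :=
  arr.foldl (fun nc num =>
    num.toList.foldl (fun nc letter =>
      let count : Int :=
        arr.foldl (fun cnt num2 => if letter ∈ num2.toList then cnt + 1 else cnt) 0
      if count = 2 ∧ String.ofList [letter] ∉ nc then nc ++ [String.ofList [letter]] else nc) nc) []

-- ===== PORT B =====
-- counts : dict keyed by each string's distinct letters; order : dict.fromkeys(''.join(arr))
-- = PySem.List.dedup over the concatenated characters; final list comprehension filters it.
def notCommon_alt (arr : List String) : List String :=
  let counts : PySem.Dict Char Int :=
    arr.foldl (fun d s =>
      (PySem.Set.ofList s.toList).foldl (fun d c => d.insert c (d.getD c 0 + 1)) d)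
      PySem.Dict.empty
  let order : List Char := PySem.List.dedup (arr.flatMap String.toList)
  (order.filter (fun c => counts.getD c 0 == 2)).map (fun c => String.ofList [c])

-- ===== PRECONDITION & SPEC =====
def Spec_notCommon (arr : List String) (out : List String) : Prop := out = notCommon_alt arr
instance (arr : List String) (out : List String) : Decidable (Spec_notCommon arr out) := by unfold Spec_notCommon; infer_instance

-- ===== CLAIM (what is proved, stated in full; the proofs are below) =====
def Claim_equal_notCommon : Prop := ∀ (arr : List String), Dom_notCommon arr → Spec_notCommon arr (notCommon arr)

-- ===== LEMMAS AND PROOFS =====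

-- A's inner count loop counts the strings containing the letter
theorem countA_eq (arr : List String) (c : Char) (k : Int) :
    arr.foldl (fun cnt num2 => if c ∈ num2.toList then cnt + 1 else cnt) k
      = k + arr.countP (fun s => decide (c ∈ s.toList)) := by
  induction arr generalizing k with
  | nil => simp
  | cons s t ih =>
    simp only [List.foldl_cons, List.countP_cons, ih]
    by_cases h : c ∈ s.toList <;> simp [h] <;> ring

-- B's counts dict looks up to the same count
theorem countsB_eq (arr : List String) (c : Char) (d : PySem.Dict Char Int) :
    (arr.foldl (fun d s =>
        (PySem.Set.ofList s.toList).foldl (fun d c => d.insert c (d.getD c 0 + 1)) d) d).getD c 0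
      = d.getD c 0 + arr.countP (fun s => decide (c ∈ s.toList)) := by
  induction arr generalizing d with
  | nil => simp
  | cons s t ih =>
    simp only [List.foldl_cons, ih, List.countP_cons]
    rw [PySem.Dict.getD_foldl_insert_add_one]
    by_cases h : c ∈ s.toList
    · have h1 : (PySem.Set.ofList s.toList).count c = 1 :=
        List.count_eq_one_of_mem (PySem.Set.nodup_ofList _) (by simpa [PySem.Set.mem_ofList] using h)
      simp [h, h1]; ring
    · have h0 : (PySem.Set.ofList s.toList).count c = 0 :=
        List.count_eq_zero_of_not_mem (by simpa [PySem.Set.mem_ofList] using h)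
      simp [h, h0]

-- first-occurrence dedup grows one element at a time
theorem dedup_append_singleton {α : Type} [DecidableEq α] (xs : List α) (c : α) :
    PySem.List.dedup (xs ++ [c])
      = if c ∈ xs then PySem.List.dedup xs else PySem.List.dedup xs ++ [c] := by
  have : PySem.List.dedup (xs ++ [c]) = PySem.Set.add (PySem.List.dedup xs) c := by
    simp [PySem.List.dedup_eq_ofList, PySem.Set.ofList, List.foldl_append]
  rw [this]
  by_cases h : c ∈ xs
  · simp [PySem.Set.add, PySem.Set.contains, List.elem_eq_contains, h]
  · simp [PySem.Set.add, PySem.Set.contains, List.elem_eq_contains, h]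

-- A's filter-and-dedup loop over a character stream, characterised
theorem loopA_eq {α : Type} [DecidableEq α] (p : α → Prop) [DecidablePred p]
    (L seen : List α) :
    L.foldl (fun nc c => if p c ∧ c ∉ nc then nc ++ [c] else nc)
        ((PySem.List.dedup seen).filter (fun c => decide (p c)))
      = (PySem.List.dedup (seen ++ L)).filter (fun c => decide (p c)) := by
  induction L generalizing seen with
  | nil => simp
  | cons c L ih =>
    have hmem : c ∈ (PySem.List.dedup seen).filter (fun c => decide (p c)) ↔ p c ∧ c ∈ seen := by
      simp [List.mem_filter, PySem.List.mem_dedup, and_comm]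
    have hstep : seen ++ c :: L = (seen ++ [c]) ++ L := by simp
    rw [hstep]
    by_cases hp : p c
    · by_cases hs : c ∈ seen
      · have : ¬ (p c ∧ c ∉ (PySem.List.dedup seen).filter (fun c => decide (p c))) := by
          simp [hmem, hp, hs]
        simp only [List.foldl_cons, if_neg this]
        rw [← ih (seen ++ [c])]
        congr 1
        rw [dedup_append_singleton, if_pos hs]
      · have : p c ∧ c ∉ (PySem.List.dedup seen).filter (fun c => decide (p c)) := by
          simp [hmem, hp, hs]
        simp only [List.foldl_cons, if_pos this]
        rw [← ih (seen ++ [c])]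
        congr 1
        rw [dedup_append_singleton, if_neg hs, List.filter_append]
        simp [hp]
    · have : ¬ (p c ∧ c ∉ (PySem.List.dedup seen).filter (fun c => decide (p c))) := by
        simp [hp]
      simp only [List.foldl_cons, if_neg this]
      rw [← ih (seen ++ [c])]
      congr 1
      rw [dedup_append_singleton]
      by_cases hs : c ∈ seen
      · rw [if_pos hs]
      · rw [if_neg hs, List.filter_append]; simp [hp]

-- the string-level loop is the char-level loop mapped through String.ofList [·]
theorem loopA_map (p : Char → Prop) [DecidablePred p] (L : List Char) (acc : List Char) :
    L.foldl (fun nc c => if p c ∧ String.ofList [c] ∉ nc then nc ++ [String.ofList [c]] else nc)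
        (acc.map (fun c => String.ofList [c]))
      = (L.foldl (fun nc c => if p c ∧ c ∉ nc then nc ++ [c] else nc) acc).map
          (fun c => String.ofList [c]) := by
  induction L generalizing acc with
  | nil => rfl
  | cons c L ih =>
    have hmem : (String.ofList [c] ∈ acc.map (fun c => String.ofList [c])) ↔ c ∈ acc := by
      simp only [List.mem_map]
      constructor
      · rintro ⟨a, ha, he⟩
        have := congrArg String.toList he
        simp at this
        exact this ▸ ha
      · exact fun h => ⟨c, h, rfl⟩
    simp only [List.foldl_cons]
    by_cases h : p c ∧ c ∉ acc
    · rw [if_pos (by simp [hmem, h.1, h.2]), if_pos h, ← ih (acc ++ [c])]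
      congr 1
      simp
    · rw [if_neg (by simp [hmem]; tauto), if_neg h, ih]

-- fold over strings of the inner char fold = fold over the concatenated chars
theorem foldl_over_flatMap {β : Type} (f : β → Char → β) (arr : List String) (b : β) :
    arr.foldl (fun nc num => num.toList.foldl f nc) b
      = (arr.flatMap String.toList).foldl f b := by
  induction arr generalizing b with
  | nil => rfl
  | cons s t ih => simp [List.foldl_append, ih]

-- ===== VERDICT (by name: the statement is the Claim_ definition above) =====
theorem notCommon_spec : Claim_equal_notCommon := by
  intro arr _
  show notCommon arr = notCommon_alt arr
  have hBdef : notCommon_alt arr = ((PySem.List.dedup (arr.flatMap String.toList)).filter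
      (fun c => (arr.foldl (fun d s =>
          (PySem.Set.ofList s.toList).foldl (fun d c => d.insert c (d.getD c 0 + 1)) d)
          (PySem.Dict.empty : PySem.Dict Char Int)).getD c 0 == 2)).map
      (fun c => String.ofList [c]) := by
    simp only [notCommon_alt]
  rw [hBdef]
  unfold notCommon
  set p : Char → Prop :=
    fun c => (arr.countP (fun s => decide (c ∈ s.toList)) : Int) = 2 with hp
  have hA :
      arr.foldl (fun nc num =>
        num.toList.foldl (fun nc letter =>
          let count : Int :=
            arr.foldl (fun cnt num2 => if letter ∈ num2.toList then cnt + 1 else cnt) 0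
          if count = 2 ∧ String.ofList [letter] ∉ nc then nc ++ [String.ofList [letter]] else nc) nc) []
        = (arr.flatMap String.toList).foldl
            (fun nc c => if p c ∧ String.ofList [c] ∉ nc then nc ++ [String.ofList [c]] else nc) [] := by
    rw [foldl_over_flatMap]
    congr 1
    funext nc c
    simp only [countA_eq, zero_add, hp]
  rw [hA]
  have hB := loopA_map p (arr.flatMap String.toList) []
  simp only [List.map_nil] at hB
  rw [hB]
  have hC := loopA_eq p (arr.flatMap String.toList) []
  simp only [show (PySem.List.dedup ([] : List Char)) = [] from rfl, List.filter_nil,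
    List.nil_append] at hC
  rw [hC]
  congr 1
  apply List.filter_congr
  intro c _
  simp only [hp, countsB_eq, PySem.Dict.getD_empty, zero_add]
  by_cases h : (arr.countP (fun s => decide (c ∈ s.toList)) : Int) = 2 <;> simp [h]
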